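-- pv_equiv track=rewrite | github.com/PatrickAllen1/music-theory-learner | als/rank_serum_vst2_module_candidates.py | _iter_contiguous_windows
-- ===== SOURCE A (Python) =====
-- def _iter_contiguous_windows(rows: list[dict], window_size: int) -> list[list[dict]]:
--     if window_size <= 0:
--         return []
--     rows = sorted(rows, key=lambda row: row["index"])
--     windows = []
--     for i in range(len(rows) - window_size + 1):
--         window = rows[i:i + window_size]
--         indexes = [row["index"] for row in window]
--         if indexes[-1] - indexes[0] != window_size - 1:
--             continue
--         if any((b - a) != 1 for a, b in zip(indexes, indexes[1:])):
--             continue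
--         windows.append(window)
--     return windows
-- ===== SOURCE B (Python) =====
-- def _iter_contiguous_windows(rows: list[dict], window_size: int) -> list[list[dict]]:
--     if window_size <= 0:
--         return []
--     srt = sorted(rows, key=lambda row: row["index"])
--     out = []
--     run = 0      # length of the contiguous run ending at the current row
--     prev = None  # index of the previous row (only read when i > 0)
--     for i, row in enumerate(srt):
--         idx = row["index"]
--         if i > 0 and idx - prev == 1:
--             run += 1
--         else:
--             run = 1
--         if run >= window_size:
--             out.append(srt[i - window_size + 1:i + 1])
--         prev = idx
--     return out
-- ===== Notes on version B (the rewrite author's own statement) =====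
-- stated objective: alternative
-- what changed: Instead of slicing every candidate start position and re-scanning the whole window's adjacent index differences, B makes a single pass over the sorted rows that maintains the length of the contiguous-index run ending at the current row and emits a window exactly when that run length reaches window_size.
import Mathlib
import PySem

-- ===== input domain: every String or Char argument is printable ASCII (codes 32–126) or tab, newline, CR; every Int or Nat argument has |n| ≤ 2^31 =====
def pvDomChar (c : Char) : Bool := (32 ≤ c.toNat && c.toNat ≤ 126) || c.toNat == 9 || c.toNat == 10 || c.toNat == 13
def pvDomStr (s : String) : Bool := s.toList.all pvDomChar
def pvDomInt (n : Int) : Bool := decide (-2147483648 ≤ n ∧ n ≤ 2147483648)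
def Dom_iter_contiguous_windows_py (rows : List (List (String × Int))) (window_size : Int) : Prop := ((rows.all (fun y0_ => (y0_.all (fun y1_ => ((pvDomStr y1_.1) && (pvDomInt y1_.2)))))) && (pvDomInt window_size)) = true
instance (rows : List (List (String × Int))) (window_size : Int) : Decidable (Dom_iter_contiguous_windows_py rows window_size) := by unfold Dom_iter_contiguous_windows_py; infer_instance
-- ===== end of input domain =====

-- B replaces A's per-start re-check of every window (slice + full adjacent-diff scan for each start)
-- by one pass that maintains the length of the contiguous run ending at the current row and emits a
-- window whenever that run reaches window_size; the RETURN values are proved equal under Pre_.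

-- row["index"] (first match in the association list; total form — Pre_ excludes a missing "index")
def pvKey (r : List (String × Int)) : Int := (List.lookup "index" r).getD 0

-- ===== PORT A =====
-- the loop body: window = rows[i:i+w]; indexes = [...]; two 'continue' checks; append
def pvAstep (s : List (List (String × Int))) (w : Int)
    (acc : List (List (List (String × Int)))) (i : Int) : List (List (List (String × Int))) :=
  let window := PySem.List.slice s (some i) (some (i + w))
  let indexes := window.map pvKey
  -- indexes is nonempty whenever the loop runs (w ≥ 1, i + w ≤ len s), so the defaults are unreachable
  if PySem.List.pyGetD indexes (-1) 0 - PySem.List.pyGetD indexes 0 0 ≠ w - 1 then acc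
  else if (indexes.zip indexes.tail).any (fun p => decide (p.2 - p.1 ≠ 1)) then acc
  else acc ++ [window]

def pvAloop (s : List (List (String × Int))) (w : Int) : List (List (List (String × Int))) :=
  (PySem.List.pyRange 0 ((s.length : Int) - w + 1) 1).foldl (pvAstep s w) []

def iter_contiguous_windows_py (rows : List (List (String × Int))) (window_size : Int) : List (List (List (String × Int))) :=
  if window_size ≤ 0 then []
  else pvAloop (PySem.List.sorted rows (fun r => pvKey r) false) window_size

-- ===== PORT B =====
-- state = (out, run, prev); Python's prev = None is only read when i > 0, so an Int placeholder is exact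
def pvBstep (s : List (List (String × Int))) (w : Int)
    (st : List (List (List (String × Int))) × Int × Int) (p : Int × List (String × Int)) :
    List (List (List (String × Int))) × Int × Int :=
  let idx := pvKey p.2
  let run := if p.1 > 0 ∧ idx - st.2.2 = 1 then st.2.1 + 1 else 1
  let out := if run ≥ w then st.1 ++ [PySem.List.slice s (some (p.1 - w + 1)) (some (p.1 + 1))] else st.1
  (out, run, idx)

def pvBloop (s : List (List (String × Int))) (w : Int) : List (List (List (String × Int))) :=
  ((PySem.List.enumerate s 0).foldl (pvBstep s w) ([], 0, 0)).1

def iter_contiguous_windows_py_alt (rows : List (List (String × Int))) (window_size : Int) : List (List (List (String × Int))) :=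
  if window_size ≤ 0 then []
  else pvBloop (PySem.List.sorted rows (fun r => pvKey r) false) window_size

-- ===== PRECONDITION & SPEC =====
-- Pre_ excludes exactly the inputs where Python A raises KeyError: window_size > 0 with a row lacking an "index" key
def Pre_iter_contiguous_windows_py (rows : List (List (String × Int))) (window_size : Int) : Prop :=
  window_size ≤ 0 ∨ ∀ r ∈ rows, "index" ∈ r.map Prod.fst
instance (rows : List (List (String × Int))) (window_size : Int) : Decidable (Pre_iter_contiguous_windows_py rows window_size) := by unfold Pre_iter_contiguous_windows_py; infer_instance

def pvWitness_iter_contiguous_windows_py : (List (List (String × Int))) × Int :=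
  ([[("index", 4)], [("index", 2)], [("index", 3)]], 2)

def Spec_iter_contiguous_windows_py (rows : List (List (String × Int))) (window_size : Int) (out : List (List (List (String × Int)))) : Prop := out = iter_contiguous_windows_py_alt rows window_size
instance (rows : List (List (String × Int))) (window_size : Int) (out : List (List (List (String × Int)))) : Decidable (Spec_iter_contiguous_windows_py rows window_size out) := by unfold Spec_iter_contiguous_windows_py; infer_instance

-- ===== CLAIM (what is proved, stated in full; the proofs are below) =====
def Claim_equal_iter_contiguous_windows_py : Prop := ∀ (rows : List (List (String × Int))) (window_size : Int), Dom_iter_contiguous_windows_py rows window_size → Pre_iter_contiguous_windows_py rows window_size → Spec_iter_contiguous_windows_py rows window_size (iter_contiguous_windows_py rows window_size)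

-- ===== LEMMAS AND PROOFS =====

-- length of the longest initial segment of a (reversed) key list that descends by exactly 1
def pvScl : List Int → Nat
  | [] => 0
  | [_] => 1
  | a :: b :: r => if a - b = 1 then pvScl (b :: r) + 1 else 1

theorem pvScl_le_length (l : List Int) : pvScl l ≤ l.length := by
  induction l with
  | nil => simp [pvScl]
  | cons a t ih =>
      cases t with
      | nil => simp [pvScl]
      | cons b r =>
          simp only [pvScl]
          split
          · simp only [List.length_cons] at ih ⊢
            omega
          · simp only [List.length_cons]
            omega

theorem pvScl_pos (a : Int) (l : List Int) : 1 ≤ pvScl (a :: l) := by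
  cases l with
  | nil => simp [pvScl]
  | cons b r =>
      simp only [pvScl]
      split
      · omega
      · omega

theorem pvScl_cons (k : Int) (l : List Int) :
    (pvScl (k :: l) : Int) = if l ≠ [] ∧ k - l.headI = 1 then (pvScl l : Int) + 1 else 1 := by
  cases l with
  | nil => simp [pvScl]
  | cons b r =>
      simp only [pvScl, List.headI, ne_eq, reduceCtorEq, not_false_iff, true_and]
      split <;> push_cast <;> rfl

-- w ≤ pvScl r  ⟺  the first w entries of r exist and descend by exactly 1
theorem pvScl_ge_iff (w : Nat) (hw : 1 ≤ w) (r : List Int) :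
    w ≤ pvScl r ↔ w ≤ r.length ∧ (r.take w).IsChain (fun a b => a - b = 1) := by
  induction r generalizing w with
  | nil => simp [pvScl]
  | cons a t ih =>
      cases t with
      | nil =>
          constructor
          · intro h
            have hw1 : w = 1 := by simp [pvScl] at h; omega
            subst hw1; simp
          · rintro ⟨h1, _⟩
            simp at h1
            simp [pvScl]; omega
      | cons b r' =>
          rcases Nat.lt_or_ge w 2 with hw1 | hw2
          · have hweq : w = 1 := by omega
            subst hweq
            constructor
            · intro _
              exact ⟨by simp, by simp⟩
            · intro _
              exact pvScl_pos a (b :: r')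
          · have htake : (a :: b :: r').take w = a :: b :: r'.take (w - 2) := by
              obtain ⟨m, rfl⟩ : ∃ m, w = m + 2 := ⟨w - 2, by omega⟩
              simp [List.take]
            have htake1 : (b :: r').take (w - 1) = b :: r'.take (w - 2) := by
              obtain ⟨m, rfl⟩ : ∃ m, w = m + 2 := ⟨w - 2, by omega⟩
              simp [List.take]
            simp only [pvScl]
            by_cases hab : a - b = 1
            · rw [if_pos hab, htake, List.isChain_cons_cons]
              have ihw := ih (w - 1) (by omega)
              rw [htake1] at ihw
              constructor
              · intro h
                have hx := ihw.mp (by omega)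
                refine ⟨by simp at hx ⊢; omega, hab, hx.2⟩
              · rintro ⟨h1, _, h2⟩
                have hx := ihw.mpr ⟨by simp at h1 ⊢; omega, h2⟩
                omega
            · rw [if_neg hab]
              constructor
              · intro h; omega
              · rintro ⟨_, h2⟩
                rw [htake, List.isChain_cons_cons] at h2
                exact absurd h2.1 hab

-- the adjacent-pair scan of A is exactly the diff-1 chain condition
theorem pvZipAny_iff (l : List Int) :
    ((l.zip l.tail).any (fun p => decide (p.2 - p.1 ≠ 1)) = false) ↔ l.IsChain (fun a b => b - a = 1) := by
  induction l with
  | nil => simp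
  | cons a t ih =>
      cases t with
      | nil => simp
      | cons b r =>
          rw [List.isChain_cons_cons, ← ih]
          simp only [List.tail_cons, List.zip_cons_cons, List.any_cons, Bool.or_eq_false_iff]
          constructor
          · rintro ⟨h1, h2⟩
            exact ⟨by simpa using h1, h2⟩
          · rintro ⟨h1, h2⟩
            exact ⟨by simpa using h1, h2⟩

-- telescoping: a diff-1 chain of length L runs from its head to head + L - 1
theorem pvTelescope (l : List Int) (hne : l ≠ []) (h : l.IsChain (fun a b => b - a = 1)) :
    l.getLast?.getD 0 - l.headI = (l.length : Int) - 1 := by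
  induction l with
  | nil => simp at hne
  | cons a t ih =>
      cases t with
      | nil => simp
      | cons b r =>
          rw [List.isChain_cons_cons] at h
          have hab := h.1
          have H := ih (by simp) h.2
          rw [List.getLast?_cons_cons]
          simp only [List.headI, List.length_cons] at H ⊢
          push_cast at H ⊢
          omega

-- A's two checks at a window of exactly w elements ⟺ diff-1 chain
theorem pvCond_iff (idx : List Int) (w : Int) (hw : 1 ≤ w) (hlen : (idx.length : Int) = w) :
    (¬ PySem.List.pyGetD idx (-1) 0 - PySem.List.pyGetD idx 0 0 ≠ w - 1 ∧
      ¬ (idx.zip idx.tail).any (fun p => decide (p.2 - p.1 ≠ 1)) = true) ↔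
    idx.IsChain (fun a b => b - a = 1) := by
  have hne : idx ≠ [] := by
    intro h; subst h; simp at hlen; omega
  constructor
  · rintro ⟨_, h2⟩
    exact (pvZipAny_iff idx).mp (by simpa using h2)
  · intro h
    have hzip := (pvZipAny_iff idx).mpr h
    refine ⟨?_, by rw [hzip]; simp⟩
    have htel := pvTelescope idx hne h
    rw [PySem.List.pyGetD_neg_one idx 0 hne, PySem.List.pyGetD_zero]
    have h1 : idx.getLast?.getD 0 = idx.getLast hne := by
      rw [List.getLast?_eq_some_getLast hne]
      rfl
    rw [h1] at htel
    have h2 : idx.getD 0 0 = idx.headI := by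
      cases idx with
      | nil => simp at hne
      | cons a t => simp [List.headI]
    rw [h2]
    omega

-- the last w keys form a diff-1 chain ⟺ the reversed key list starts with a descent of length ≥ w
theorem pvWindowChain_iff (ks : List Int) (w : Nat) (hw : 1 ≤ w) (hn : w ≤ ks.length) :
    (ks.drop (ks.length - w)).IsChain (fun a b => b - a = 1) ↔ w ≤ pvScl ks.reverse := by
  rw [pvScl_ge_iff w hw]
  have htake : ks.reverse.take w = (ks.drop (ks.length - w)).reverse := by
    rw [List.reverse_drop]; congr 1; omega
  rw [htake, List.isChain_reverse]
  constructor
  · intro h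
    exact ⟨by simp; omega, h⟩
  · rintro ⟨_, h⟩
    exact h

-- A's loop over t ++ [x]: the old windows, plus possibly the one window ending at x
theorem pvAloop_append (w : Int) (hw : 1 ≤ w) (t : List (List (String × Int))) (x : List (String × Int)) :
    pvAloop (t ++ [x]) w =
      pvAloop t w ++
        (if w.toNat ≤ pvScl (((t ++ [x]).map pvKey).reverse)
         then [(t ++ [x]).drop ((t ++ [x]).length - w.toNat)] else []) := by
  have hlen : ((t ++ [x]).length : Int) = (t.length : Int) + 1 := by simp
  by_cases hcase : w ≤ (t.length : Int) + 1
  · have hb : (0:Int) ≤ (t.length : Int) - w + 1 := by omega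
    have hsplit : PySem.List.pyRange 0 (((t ++ [x]).length : Int) - w + 1) 1
        = PySem.List.pyRange 0 ((t.length : Int) - w + 1) 1 ++ [(t.length : Int) - w + 1] := by
      have he : ((t ++ [x]).length : Int) - w + 1 = ((t.length : Int) - w + 1) + 1 := by
        rw [hlen]; ring
      rw [he, PySem.List.pyRange_one_succ_right hb]
    unfold pvAloop
    rw [hsplit, List.foldl_append]
    rw [PySem.List.foldl_congr_mem _ (pvAstep (t ++ [x]) w) (pvAstep t w) []
      (by
        intro acc i hi
        rw [PySem.List.mem_pyRange_one] at hi
        have hs : PySem.List.slice (t ++ [x]) (some i) (some (i + w))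
            = PySem.List.slice t (some i) (some (i + w)) := by
          rw [PySem.List.slice_toNat _ hi.1 (by omega), PySem.List.slice_toNat _ hi.1 (by omega)]
          rw [List.drop_append_of_le_length (by omega)]
          rw [List.take_append_of_le_length (by simp [List.length_drop]; omega)]
        simp only [pvAstep, hs])]
    simp only [List.foldl_cons, List.foldl_nil]
    have hwin : PySem.List.slice (t ++ [x]) (some ((t.length : Int) - w + 1)) (some ((t.length : Int) - w + 1 + w))
        = (t ++ [x]).drop ((t ++ [x]).length - w.toNat) := by
      have hiw : (t.length : Int) - w + 1 + w = (t.length : Int) + 1 := by ring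
      rw [hiw, PySem.List.slice_toNat _ (by omega) (by omega)]
      have h1 : ((t.length : Int) - w + 1).toNat = (t ++ [x]).length - w.toNat := by
        simp [List.length_append]; omega
      have h2 : ((t.length : Int) + 1).toNat - ((t.length : Int) - w + 1).toNat = w.toNat := by omega
      rw [h2, h1]
      apply List.take_of_length_le
      simp [List.length_drop, List.length_append]
      omega
    simp only [pvAstep]
    rw [hwin]
    set idx := ((t ++ [x]).drop ((t ++ [x]).length - w.toNat)).map pvKey with hidx
    have hidx2 : idx = ((t ++ [x]).map pvKey).drop (((t ++ [x]).map pvKey).length - w.toNat) := by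
      rw [hidx, List.map_drop, List.length_map]

    have hlenidx : (idx.length : Int) = w := by
      rw [hidx]
      simp [List.length_map, List.length_drop, List.length_append]
      omega
    have hcnd := pvCond_iff idx w hw hlenidx
    have hwc := pvWindowChain_iff ((t ++ [x]).map pvKey) w.toNat (by omega)
      (by simp [List.length_map, List.length_append]; omega)
    by_cases hc : w.toNat ≤ pvScl (((t ++ [x]).map pvKey).reverse)
    · have hchain : idx.IsChain (fun a b => b - a = 1) := by
        rw [hidx2]
        exact hwc.mpr hc
      obtain ⟨h1, h2⟩ := hcnd.mpr hchain
      rw [if_neg h1, if_neg (by simpa using h2), if_pos hc]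
    · rw [if_neg hc]
      by_cases h1 : PySem.List.pyGetD idx (-1) 0 - PySem.List.pyGetD idx 0 0 ≠ w - 1
      · rw [if_pos h1, List.append_nil]
      · rw [if_neg h1]
        by_cases h2 : (idx.zip idx.tail).any (fun p => decide (p.2 - p.1 ≠ 1)) = true
        · rw [if_pos h2, List.append_nil]
        · exfalso
          apply hc
          apply hwc.mp
          rw [← hidx2]
          exact hcnd.mp ⟨h1, h2⟩
  · have h1 : pvAloop (t ++ [x]) w = [] := by
      unfold pvAloop
      rw [PySem.List.pyRange_one_eq_nil (by rw [hlen]; omega)]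
      rfl
    have h2 : pvAloop t w = [] := by
      unfold pvAloop
      rw [PySem.List.pyRange_one_eq_nil (by omega)]
      rfl
    have h3 : ¬ w.toNat ≤ pvScl (((t ++ [x]).map pvKey).reverse) := by
      have hle := pvScl_le_length (((t ++ [x]).map pvKey).reverse)
      rw [List.length_reverse, List.length_map, List.length_append] at hle
      simp only [List.length_cons, List.length_nil] at hle
      omega
    rw [h1, h2, if_neg h3]
    rfl

-- B's fold, characterised: output so far = A's loop, run counter = pvScl, prev = last key
theorem pvBchar (w : Int) (hw : 1 ≤ w) (t ext : List (List (String × Int))) :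
    (PySem.List.enumerate t 0).foldl (pvBstep (t ++ ext) w) ([], 0, 0) =
      (pvAloop t w, (pvScl ((t.map pvKey).reverse) : Int), ((t.map pvKey).reverse).headI) := by
  induction t using List.reverseRecOn generalizing ext with
  | nil =>
      simp only [PySem.List.enumerate_nil, List.foldl_nil, List.map_nil, List.reverse_nil]
      unfold pvAloop
      rw [PySem.List.pyRange_one_eq_nil (by simp; omega)]
      simp [pvScl, List.headI]
  | append_singleton t x ih =>
      rw [PySem.List.enumerate_append, List.foldl_append, List.append_assoc, ih ([x] ++ ext)]
      have hkr : ((t ++ [x]).map pvKey).reverse = pvKey x :: (t.map pvKey).reverse := by simp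
      simp only [PySem.List.enumerate_cons, PySem.List.enumerate_nil, List.foldl_cons,
        List.foldl_nil, zero_add]
      simp only [pvBstep]
      have hlp : ((t.length : Int) > 0 ∧ pvKey x - ((t.map pvKey).reverse).headI = 1)
          ↔ ((t.map pvKey).reverse ≠ [] ∧ pvKey x - ((t.map pvKey).reverse).headI = 1) := by
        constructor
        · rintro ⟨hh, h2⟩
          refine ⟨?_, h2⟩
          cases t with
          | nil => simp at hh
          | cons a s => simp
        · rintro ⟨hh, h2⟩
          refine ⟨?_, h2⟩
          cases t with
          | nil => simp at hh
          | cons a s => simp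
      have hrun : (if (t.length : Int) > 0 ∧ pvKey x - ((t.map pvKey).reverse).headI = 1
            then (pvScl ((t.map pvKey).reverse) : Int) + 1 else 1)
          = (pvScl (pvKey x :: (t.map pvKey).reverse) : Int) := by
        rw [pvScl_cons, if_congr hlp rfl rfl]
      rw [hrun, pvAloop_append w hw t x, hkr]
      by_cases hc : w.toNat ≤ pvScl (pvKey x :: (t.map pvKey).reverse)
      · have hwlen : w.toNat ≤ t.length + 1 := by
          have hle := pvScl_le_length (pvKey x :: (t.map pvKey).reverse)
          simp [List.length_cons, List.length_reverse, List.length_map] at hle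
          omega
        have hslice : PySem.List.slice (t ++ ([x] ++ ext)) (some ((t.length : Int) - w + 1))
              (some ((t.length : Int) + 1))
            = (t ++ [x]).drop ((t ++ [x]).length - w.toNat) := by
          rw [PySem.List.slice_toNat _ (by omega) (by omega)]
          have ha : ((t.length : Int) - w + 1).toNat = (t ++ [x]).length - w.toNat := by
            simp [List.length_append]; omega
          have hcnt : ((t.length : Int) + 1).toNat - ((t.length : Int) - w + 1).toNat = w.toNat := by
            omega
          rw [hcnt, ha, ← List.append_assoc]
          rw [List.drop_append_of_le_length (by simp [List.length_append])]
          apply List.take_left'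
          simp [List.length_drop, List.length_append]
          omega
        rw [if_pos (show (pvScl (pvKey x :: (t.map pvKey).reverse) : Int) ≥ w by omega),
          if_pos hc, hslice]
        simp [List.headI]
      · rw [if_neg (show ¬ (pvScl (pvKey x :: (t.map pvKey).reverse) : Int) ≥ w by omega),
          if_neg hc, List.append_nil]
        simp [List.headI]

-- ===== VERDICT (by name: the statement is the Claim_ definition above) =====
theorem iter_contiguous_windows_py_spec : Claim_equal_iter_contiguous_windows_py := by
  intro rows w _ _
  unfold Spec_iter_contiguous_windows_py iter_contiguous_windows_py iter_contiguous_windows_py_alt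
  by_cases h : w ≤ 0
  · simp [h]
  · simp only [if_neg h]
    have hB := pvBchar w (by omega) (PySem.List.sorted rows (fun r => pvKey r) false) []
    rw [List.append_nil] at hB
    unfold pvBloop
    rw [hB]
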